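-- pv_equiv track=rewrite | github.com/ThomasBisset/rpg-discord-tools | main.py | pull_trigger
-- ===== SOURCE A (Python) =====
-- def pull_trigger(loaded_gun, n=1):
--     """
--     Simulates the game Russian Roulette
--     :param loaded_gun: A list of Boolean values - 'True' represents the presence of a bullet in a
--     chamber, while 'False' is an empty chamber
--     :param n: The number of trigger pulls
--     :return: A list containing the results of the trigger pulls
--     """
--     result = []
--     for _loop in range(n):
--         if len(loaded_gun) <= 0:              # Checks if the list is empty
--             result.append("* click * ")     # (all bullets have been fired, cylinder just rotates)
--         elif not loaded_gun[0]:               # Checks if the first chamber is empty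
--             result.append("* click *")
--             loaded_gun.remove(loaded_gun[0])
--         elif loaded_gun[0]:                   # Checks if first chamber has a loaded round
--             result.append("* BANG! *")
--             loaded_gun.remove(loaded_gun[0])
--     return result
-- ===== SOURCE B (Python) =====
-- def pull_trigger(loaded_gun, n=1):
--     """Simulates Russian Roulette: two-phase version.
--     First consumes k = clamp(n, 0, len) chambers via one comprehension,
--     then appends empty-cylinder clicks; same in-place mutation as A."""
--     k = max(0, min(n, len(loaded_gun)))
--     result = ["* BANG! *" if chamber else "* click *" for chamber in loaded_gun[:k]]
--     result += ["* click * "] * (n - k)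
--     del loaded_gun[:k]
--     return result
-- ===== Notes on version B (the rewrite author's own statement) =====
-- stated objective: simpler
-- what changed: Replaces the per-pull range(n) loop with branching and list mutation inside it by a closed-form split: k = clamp(n,0,len) chambers are mapped in one comprehension and the remaining n-k empty-cylinder clicks are appended as a repeated literal; the mutation becomes a single del of the prefix.
import Mathlib
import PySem

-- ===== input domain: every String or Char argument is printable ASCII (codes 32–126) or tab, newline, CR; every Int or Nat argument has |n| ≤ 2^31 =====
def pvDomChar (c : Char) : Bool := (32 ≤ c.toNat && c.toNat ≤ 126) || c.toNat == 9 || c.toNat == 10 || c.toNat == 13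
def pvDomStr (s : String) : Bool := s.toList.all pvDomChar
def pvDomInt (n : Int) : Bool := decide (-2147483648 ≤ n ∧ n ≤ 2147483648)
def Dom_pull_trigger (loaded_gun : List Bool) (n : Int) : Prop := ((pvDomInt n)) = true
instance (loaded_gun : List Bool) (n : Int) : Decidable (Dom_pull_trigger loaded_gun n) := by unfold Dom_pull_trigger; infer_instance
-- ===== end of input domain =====

-- B replaces A's per-pull loop by a closed-form split (k consumed chambers mapped at once,
-- then the empty-cylinder clicks); equivalence is about the RETURN value only — in Python
-- both A and B also delete the first k elements of loaded_gun in place (same mutation).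

-- ===== PORT A =====
-- per-pull loop over range(n); state = (remaining gun, result so far).
-- 'loaded_gun.remove(loaded_gun[0])' removes the first element equal to the head,
-- i.e. the head itself, so it is ported as dropping the head.
def pull_trigger (loaded_gun : List Bool) (n : Int) : List String :=
  ((PySem.List.pyRange 0 n 1).foldl
    (fun (st : List Bool × List String) _ =>
      match st.1 with
      | [] => ([], st.2 ++ ["* click * "])
      | b :: rest =>
        if !b then (rest, st.2 ++ ["* click *"])
        else (rest, st.2 ++ ["* BANG! *"]))
    (loaded_gun, [])).2

-- ===== PORT B =====
def pull_trigger_alt (loaded_gun : List Bool) (n : Int) : List String :=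
  let k : Int := max 0 (min n (loaded_gun.length : Int))
  ((PySem.List.slice loaded_gun none (some k)).map
      (fun chamber => if chamber then "* BANG! *" else "* click *"))
    ++ List.replicate (n - k).toNat "* click * "

-- ===== PRECONDITION & SPEC =====
def Spec_pull_trigger (loaded_gun : List Bool) (n : Int) (out : List String) : Prop := out = pull_trigger_alt loaded_gun n
instance (loaded_gun : List Bool) (n : Int) (out : List String) : Decidable (Spec_pull_trigger loaded_gun n out) := by unfold Spec_pull_trigger; infer_instance

-- ===== CLAIM (what is proved, stated in full; the proofs are below) =====
def Claim_equal_pull_trigger : Prop := ∀ (loaded_gun : List Bool) (n : Int), Dom_pull_trigger loaded_gun n → Spec_pull_trigger loaded_gun n (pull_trigger loaded_gun n)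

-- ===== LEMMAS AND PROOFS =====

-- the step function of A's loop, named for the lemmas below
def pvStep (st : List Bool × List String) (_x : Int) : List Bool × List String :=
  match st.1 with
  | [] => ([], st.2 ++ ["* click * "])
  | b :: rest =>
    if !b then (rest, st.2 ++ ["* click *"])
    else (rest, st.2 ++ ["* BANG! *"])

-- A's loop depends only on the LENGTH of the range list; characterise its output.
theorem pvLoop_eq (l : List Int) : ∀ (gun : List Bool) (acc : List String),
    (l.foldl pvStep (gun, acc)).2
      = acc ++ (gun.take l.length).map (fun b => if b then "* BANG! *" else "* click *")
            ++ List.replicate (l.length - gun.length) "* click * " := by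
  induction l with
  | nil => intro gun acc; simp
  | cons x xs ih =>
    intro gun acc
    cases gun with
    | nil =>
      simp only [List.foldl_cons, pvStep, ih, List.take_nil, List.map_nil,
        List.length_cons, List.length_nil, Nat.sub_zero]
      simp [← List.replicate_succ]
    | cons b rest =>
      cases b <;>
        simp [List.foldl_cons, pvStep, ih, List.append_assoc, Nat.succ_sub_succ]

theorem pull_trigger_eq_alt (gun : List Bool) (n : Int) :
    pull_trigger gun n = pull_trigger_alt gun n := by
  have h := pvLoop_eq (PySem.List.pyRange 0 n 1) gun []
  simp only [pull_trigger, pull_trigger_alt]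
  show (List.foldl pvStep (gun, []) (PySem.List.pyRange 0 n 1)).2 = _
  rw [h, PySem.List.length_pyRange_one, PySem.List.slice_to (hb := by omega), List.nil_append]
  congr 1
  · congr 1
    rw [List.take_eq_take_min]
    congr 1
    omega
  · congr 1
    omega

-- ===== VERDICT (by name: the statement is the Claim_ definition above) =====
theorem pull_trigger_spec : Claim_equal_pull_trigger := by
  intro gun n _
  unfold Spec_pull_trigger
  exact pull_trigger_eq_alt gun n
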